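-- pv_equiv track=rewrite | github.com/ai4mde/chatbot | chatback/app/services/chat/diagrams/diagram_agent_graph.py | extract_diagrams_from_uml
-- ===== SOURCE A (Python) =====
-- from typing import Dict, List, Any, TypedDict, Optional, Annotated, Literal
--
-- def extract_diagrams_from_uml(uml_content: str) -> Dict[str, str]:
--     """
--     Extract individual diagrams from the UML content.
--
--     Args:
--         uml_content: The UML content containing multiple diagrams
--
--     Returns:
--         A dictionary mapping diagram types to their content
--     """
--     if not uml_content:
--         return {}
--
--     diagrams = {}
--     current_type = None
--     current_content = []
--
--     for line in uml_content.split('\n'):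
--         if '## Class Diagram' in line:
--             if current_type and current_content:
--                 # Save previous diagram if exists
--                 diagrams[current_type] = '\n'.join(current_content)
--             current_type = 'Class Diagram'
--             current_content = []
--         elif '## Use Case Diagram' in line:
--             if current_type and current_content:
--                 diagrams[current_type] = '\n'.join(current_content)
--             current_type = 'Use Case Diagram'
--             current_content = []
--         elif '## Sequence Diagram' in line:
--             if current_type and current_content:
--                 diagrams[current_type] = '\n'.join(current_content)
--             current_type = 'Sequence Diagram'
--             current_content = []
--         elif '## Activity Diagram' in line:
--             if current_type and current_content:
--                 diagrams[current_type] = '\n'.join(current_content)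
--             current_type = 'Activity Diagram'
--             current_content = []
--         elif current_type:
--             current_content.append(line)
--
--     # Save the last diagram
--     if current_type and current_content:
--         diagrams[current_type] = '\n'.join(current_content)
--
--     return diagrams
-- ===== SOURCE B (Python) =====
-- def extract_diagrams_from_uml(uml_content: str) -> dict:
--     """Single reverse pass: collect each section's body back-to-front, emit
--     (type, text) when its header line is reached, then build the dict in
--     forward order."""
--     if not uml_content:
--         return {}
--
--     def header_type(line):
--         for m in ('Class Diagram', 'Use Case Diagram', 'Sequence Diagram', 'Activity Diagram'):
--             if '## ' + m in line:
--                 return m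
--         return None
--
--     sections = []   # sections, last one first
--     body = []       # current section's lines, in reverse order
--     for line in reversed(uml_content.split('\n')):
--         t = header_type(line)
--         if t is None:
--             body.append(line)
--         else:
--             if body:
--                 sections.append((t, '\n'.join(reversed(body))))
--             body = []
--     # lines left in `body` precede the first header and are dropped
--
--     diagrams = {}
--     for t, text in reversed(sections):
--         diagrams[t] = text
--     return diagrams
-- ===== Notes on version B (the rewrite author's own statement) =====
-- stated objective: alternative
-- what changed: Replaces A's forward state machine (current_type/current_content accumulator with a save snippet repeated in four branches and after the loop) by a single reverse pass that collects each section body back-to-front and emits (type, text) pairs when the header line is reached, then builds the dict from those pairs in forward order.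
import Mathlib
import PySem

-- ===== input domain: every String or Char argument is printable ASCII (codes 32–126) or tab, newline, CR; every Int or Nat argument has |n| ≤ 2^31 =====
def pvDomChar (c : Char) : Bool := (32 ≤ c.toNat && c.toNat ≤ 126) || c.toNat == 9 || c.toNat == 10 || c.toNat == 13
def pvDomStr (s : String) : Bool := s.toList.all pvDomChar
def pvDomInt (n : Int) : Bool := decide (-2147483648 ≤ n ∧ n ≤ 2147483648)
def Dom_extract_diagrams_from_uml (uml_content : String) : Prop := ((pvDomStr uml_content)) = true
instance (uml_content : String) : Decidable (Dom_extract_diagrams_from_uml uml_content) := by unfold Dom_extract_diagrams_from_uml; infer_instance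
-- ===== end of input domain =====

-- B replaces A's forward current_type/current_content state machine by one reverse pass that
-- emits (type, joined body) at each header line; same O(n) cost, different decomposition.

-- ===== PORT A =====
-- the three-line "save previous diagram" snippet A repeats in all four branches and after the
-- loop; `current_type` is always None or one of four nonempty literals, so its Python
-- truthiness is exactly `Option.isSome` (matched here), and `current_content` is truthy iff ≠ []
def pvSaveA (d : PySem.Dict String String) (ct : Option String) (cc : List String) :
    PySem.Dict String String :=
  match ct with
  | some t => if cc ≠ [] then d.insert t (PySem.Str.join "\n" cc) else d
  | none => d

def pvStepA (st : PySem.Dict String String × Option String × List String) (line : String) :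
    PySem.Dict String String × Option String × List String :=
  let (d, ct, cc) := st
  if PySem.Str.isIn "## Class Diagram" line then
    (pvSaveA d ct cc, some "Class Diagram", ([] : List String))
  else if PySem.Str.isIn "## Use Case Diagram" line then
    (pvSaveA d ct cc, some "Use Case Diagram", ([] : List String))
  else if PySem.Str.isIn "## Sequence Diagram" line then
    (pvSaveA d ct cc, some "Sequence Diagram", ([] : List String))
  else if PySem.Str.isIn "## Activity Diagram" line then
    (pvSaveA d ct cc, some "Activity Diagram", ([] : List String))
  else
    match ct with
    | some _ => (d, ct, cc ++ [line])
    | none => (d, ct, cc)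

def extract_diagrams_from_uml (uml_content : String) : List (String × String) :=
  if uml_content = "" then []
  else
    let st := ((PySem.Str.split? uml_content "\n").getD []).foldl pvStepA (PySem.Dict.empty, none, [])
    (pvSaveA st.1 st.2.1 st.2.2).items

-- ===== PORT B =====
-- header_type: first of the four markers whose '## '-prefixed form occurs in the line
def pvHdr (line : String) : Option String :=
  ["Class Diagram", "Use Case Diagram", "Sequence Diagram", "Activity Diagram"].find?
    (fun m => PySem.Str.isIn ("## " ++ m) line)

def pvStepB (st : List (String × String) × List String) (line : String) :
    List (String × String) × List String :=
  let (sections, body) := st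
  match pvHdr line with
  | none => (sections, body ++ [line])
  | some t =>
      (if body ≠ [] then sections ++ [(t, PySem.Str.join "\n" body.reverse)] else sections,
       ([] : List String))

def extract_diagrams_from_uml_alt (uml_content : String) : List (String × String) :=
  if uml_content = "" then []
  else
    let st := ((PySem.Str.split? uml_content "\n").getD []).reverse.foldl pvStepB ([], [])
    (st.1.reverse.foldl (fun (d : PySem.Dict String String) p => d.insert p.1 p.2)
      PySem.Dict.empty).items

-- ===== PRECONDITION & SPEC =====
def Spec_extract_diagrams_from_uml (uml_content : String) (out : List (String × String)) : Prop := out = extract_diagrams_from_uml_alt uml_content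
instance (uml_content : String) (out : List (String × String)) : Decidable (Spec_extract_diagrams_from_uml uml_content out) := by unfold Spec_extract_diagrams_from_uml; infer_instance

-- ===== CLAIM (what is proved, stated in full; the proofs are below) =====
def Claim_equal_extract_diagrams_from_uml : Prop := ∀ (uml_content : String), Dom_extract_diagrams_from_uml uml_content → Spec_extract_diagrams_from_uml uml_content (extract_diagrams_from_uml uml_content)

-- ===== LEMMAS AND PROOFS =====

-- B's reverse-foldl, rewritten as a structural foldr over the lines
def pvF (lines : List String) : List (String × String) × List String :=
  lines.foldr (fun line st => pvStepB st line) ([], [])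

def pvInsertAll (d : PySem.Dict String String) (ps : List (String × String)) :
    PySem.Dict String String :=
  ps.foldl (fun d p => d.insert p.1 p.2) d

-- the dict state A reaches at the first header (or end), given the pending section (ct, cc)
def pvBase (d : PySem.Dict String String) (ct : Option String) (cc : List String)
    (lines : List String) : PySem.Dict String String :=
  match ct with
  | none => d
  | some t =>
      let full := cc ++ lines.takeWhile (fun l => (pvHdr l).isNone)
      if full ≠ [] then d.insert t (PySem.Str.join "\n" full) else d

theorem pvF_cons (l : String) (ls : List String) : pvF (l :: ls) = pvStepB (pvF ls) l := rfl

theorem pvStepA_none (line : String) (h : pvHdr line = none) (d : PySem.Dict String String)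
    (ct : Option String) (cc : List String) :
    pvStepA (d, ct, cc) line =
      match ct with
      | some _ => (d, ct, cc ++ [line])
      | none => (d, ct, cc) := by
  simp only [pvHdr, List.find?] at h
  simp only [pvStepA]
  cases h1 : PySem.Str.isIn "## Class Diagram" line <;>
    cases h2 : PySem.Str.isIn "## Use Case Diagram" line <;>
      cases h3 : PySem.Str.isIn "## Sequence Diagram" line <;>
        cases h4 : PySem.Str.isIn "## Activity Diagram" line <;>
          simp_all

theorem pvStepA_some (line t : String) (h : pvHdr line = some t)
    (d : PySem.Dict String String) (ct : Option String) (cc : List String) :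
    pvStepA (d, ct, cc) line = (pvSaveA d ct cc, some t, ([] : List String)) := by
  simp only [pvHdr, List.find?] at h
  simp only [pvStepA]
  cases h1 : PySem.Str.isIn "## Class Diagram" line <;>
    cases h2 : PySem.Str.isIn "## Use Case Diagram" line <;>
      cases h3 : PySem.Str.isIn "## Sequence Diagram" line <;>
        cases h4 : PySem.Str.isIn "## Activity Diagram" line <;>
          simp_all

theorem pvF_snd (lines : List String) :
    (pvF lines).2 = (lines.takeWhile (fun l => (pvHdr l).isNone)).reverse := by
  induction lines with
  | nil => rfl
  | cons l ls ih =>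
      rw [pvF_cons]
      cases h : pvHdr l <;> simp [pvStepB, h, ih]

theorem pvMain (lines : List String) (d : PySem.Dict String String) (ct : Option String)
    (cc : List String) :
    pvSaveA (lines.foldl pvStepA (d, ct, cc)).1 (lines.foldl pvStepA (d, ct, cc)).2.1
        (lines.foldl pvStepA (d, ct, cc)).2.2 =
      pvInsertAll (pvBase d ct cc lines) (pvF lines).1.reverse := by
  induction lines generalizing d ct cc with
  | nil =>
      cases ct <;> simp [pvF, pvInsertAll, pvBase, pvSaveA]
  | cons l ls ih =>
      have hA : (l :: ls).foldl pvStepA (d, ct, cc) = ls.foldl pvStepA (pvStepA (d, ct, cc) l) := rfl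
      cases h : pvHdr l with
      | none =>
          have htw : (l :: ls).takeWhile (fun l => (pvHdr l).isNone)
              = l :: ls.takeWhile (fun l => (pvHdr l).isNone) := by
            simp [h]
          cases ct with
          | none =>
              simp only [hA, pvStepA_none l h]
              rw [ih]
              simp [pvBase, pvF_cons, pvStepB, h]
          | some t =>
              simp only [hA, pvStepA_none l h]
              rw [ih]
              simp only [pvF_cons, pvStepB, h]
              simp [pvBase, htw, List.append_assoc]
      | some t' =>
          have htw : (l :: ls).takeWhile (fun l => (pvHdr l).isNone) = [] := by
            simp [h]
          have hbase : pvBase d ct cc (l :: ls) = pvSaveA d ct cc := by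
            cases ct <;> simp [pvBase, pvSaveA, htw]
          simp only [hA, pvStepA_some l t' h]
          rw [ih, hbase]
          have hsnd := pvF_snd ls
          by_cases htw2 : ls.takeWhile (fun l => (pvHdr l).isNone) = []
          · have h1 : (pvF (l :: ls)).1 = (pvF ls).1 := by
              simp [pvF_cons, pvStepB, h, hsnd, htw2]
            rw [h1]
            simp [pvBase, htw2]
          · have h1 : (pvF (l :: ls)).1
                = (pvF ls).1 ++ [(t', PySem.Str.join "\n" (ls.takeWhile (fun l => (pvHdr l).isNone)))] := by
              simp [pvF_cons, pvStepB, h, hsnd, htw2]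
            rw [h1]
            simp only [List.reverse_append, List.reverse_singleton, List.singleton_append]
            have h2 : pvInsertAll (pvSaveA d ct cc)
                ((t', PySem.Str.join "\n" (ls.takeWhile (fun l => (pvHdr l).isNone))) :: (pvF ls).1.reverse)
              = pvInsertAll ((pvSaveA d ct cc).insert t'
                  (PySem.Str.join "\n" (ls.takeWhile (fun l => (pvHdr l).isNone)))) (pvF ls).1.reverse := rfl
            rw [h2]
            simp [pvBase, htw2]

-- ===== VERDICT (by name: the statement is the Claim_ definition above) =====
theorem extract_diagrams_from_uml_spec : Claim_equal_extract_diagrams_from_uml := by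
  intro uml _
  unfold Spec_extract_diagrams_from_uml extract_diagrams_from_uml extract_diagrams_from_uml_alt
  by_cases h : uml = ""
  · simp [h]
  · simp only [h, if_false]
    have hrev : ((PySem.Str.split? uml "\n").getD []).reverse.foldl pvStepB ([], [])
        = pvF ((PySem.Str.split? uml "\n").getD []) := by
      simp [pvF, List.foldl_reverse]
    rw [hrev]
    have hm := pvMain ((PySem.Str.split? uml "\n").getD []) PySem.Dict.empty none []
    rw [hm]
    simp [pvBase, pvInsertAll]
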